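-- pv_equiv track=rewrite | github.com/FabianQuicken/Ambros_analysis | full_module_analysis/create_labelled_video.py | _default_palette
-- ===== SOURCE A (Python) =====
-- from typing import Dict, List, Optional, Tuple
--
-- def _default_palette(n: int) -> List[Tuple[int, int, int]]:
--     base = [
--         (66, 133, 244),  # blue
--         (234, 67, 53),   # red
--         (251, 188, 5),   # yellow
--         (52, 168, 83),   # green
--         (171, 71, 188),  # purple
--         (0, 172, 193),   # cyan
--         (255, 112, 67),  # orange
--         (124, 179, 66),  # lime
--     ]
--     return [base[i % len(base)] for i in range(n)]
-- ===== SOURCE B (Python) =====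
-- def _default_palette(n):
--     base = [
--         (66, 133, 244),
--         (234, 67, 53),
--         (251, 188, 5),
--         (52, 168, 83),
--         (171, 71, 188),
--         (0, 172, 193),
--         (255, 112, 67),
--         (124, 179, 66),
--     ]
--     count = max(0, n)
--     reps = count // len(base) + 1
--     return (base * reps)[:count]
-- ===== Notes on version B (the rewrite author's own statement) =====
-- stated objective: faster
-- what changed: Replaces the per-index comprehension base[i % len(base)] over range(n) with whole-list replication (base * (count//len(base)+1)) truncated by a slice to max(0, n) elements, removing the per-element Python-level loop.
import Mathlib
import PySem

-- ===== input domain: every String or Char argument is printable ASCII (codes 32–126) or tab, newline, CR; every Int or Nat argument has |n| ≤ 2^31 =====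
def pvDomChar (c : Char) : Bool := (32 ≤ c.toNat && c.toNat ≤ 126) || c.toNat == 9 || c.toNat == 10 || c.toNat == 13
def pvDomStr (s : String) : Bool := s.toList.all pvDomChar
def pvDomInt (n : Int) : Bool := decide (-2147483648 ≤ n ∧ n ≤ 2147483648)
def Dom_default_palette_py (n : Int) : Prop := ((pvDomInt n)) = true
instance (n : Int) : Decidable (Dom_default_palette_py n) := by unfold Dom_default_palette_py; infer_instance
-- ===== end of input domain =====

-- B replaces the per-index comprehension base[i % len(base)] with list replication
-- truncated by a slice (constant-factor faster: no per-element Python loop).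

def pvBasePalette : List (Int × Int × Int) :=
  [(66, 133, 244), (234, 67, 53), (251, 188, 5), (52, 168, 83),
   (171, 71, 188), (0, 172, 193), (255, 112, 67), (124, 179, 66)]

-- ===== PORT A =====
-- [base[i % len(base)] for i in range(n)]
def default_palette_py (n : Int) : List (Int × Int × Int) :=
  (PySem.List.pyRange 0 n 1).map
    (fun i => PySem.List.pyGetD pvBasePalette (PySem.Int.mod i (pvBasePalette.length : Int)) (0, 0, 0))

-- ===== PORT B =====
-- count = max(0, n); reps = count // len(base) + 1; (base * reps)[:count]
def default_palette_py_alt (n : Int) : List (Int × Int × Int) :=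
  let count : Int := max 0 n
  let reps : Int := PySem.Int.floordiv count (pvBasePalette.length : Int) + 1
  PySem.List.slice ((List.replicate reps.toNat pvBasePalette).flatten) none (some count)

-- ===== PRECONDITION & SPEC =====
def Spec_default_palette_py (n : Int) (out : List (Int × Int × Int)) : Prop := out = default_palette_py_alt n
instance (n : Int) (out : List (Int × Int × Int)) : Decidable (Spec_default_palette_py n out) := by unfold Spec_default_palette_py; infer_instance

-- ===== CLAIM (what is proved, stated in full; the proofs are below) =====
def Claim_equal_default_palette_py : Prop := ∀ (n : Int), Dom_default_palette_py n → Spec_default_palette_py n (default_palette_py n)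

-- ===== LEMMAS AND PROOFS =====

-- element k of m concatenated copies of l is l[k % l.length]
theorem flatten_replicate_getElem? {α : Type} (m : Nat) (l : List α) (k : Nat)
    (hk : k < m * l.length) :
    ((List.replicate m l).flatten)[k]? = l[k % l.length]? := by
  induction m generalizing k with
  | zero => omega
  | succ m ih =>
    rw [List.replicate_succ, List.flatten_cons, List.getElem?_append]
    by_cases h : k < l.length
    · simp [h, Nat.mod_eq_of_lt h]
    · push Not at h
      rw [if_neg (by omega)]
      have hlt : k - l.length < m * l.length := by
        have : (m + 1) * l.length = m * l.length + l.length := by ring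
        omega
      rw [ih (k - l.length) hlt, Nat.mod_eq_sub_mod h]

theorem default_palette_eq (n : Int) :
    default_palette_py n = default_palette_py_alt n := by
  unfold default_palette_py default_palette_py_alt
  have hlen : (pvBasePalette.length : Int) = ((8 : Nat) : Int) := by rfl
  have hmax : max 0 n = ((n.toNat : Nat) : Int) := by omega
  rw [hlen, hmax, PySem.List.pyRange_one]
  rw [show n - 0 = n from by ring]
  dsimp only
  rw [List.map_map]
  have hdiv : PySem.Int.floordiv ((n.toNat : Nat) : Int) ((8 : Nat) : Int)
      = ((n.toNat / 8 : Nat) : Int) := PySem.Int.floordiv_natCast n.toNat 8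
  rw [hdiv, PySem.List.slice_to _ (by positivity)]
  have hreps : ((((n.toNat / 8 : Nat) : Int) + 1).toNat) = n.toNat / 8 + 1 := by omega
  have htoNat : ((((n.toNat : Nat) : Int)).toNat) = n.toNat := by omega
  rw [hreps, htoNat]
  apply List.ext_getElem?
  intro k
  rw [List.getElem?_map, List.getElem?_take]
  by_cases hk : k < n.toNat
  · rw [List.getElem?_range hk, if_pos hk,
      flatten_replicate_getElem? (n.toNat / 8 + 1) pvBasePalette k (by
        show k < (n.toNat / 8 + 1) * pvBasePalette.length
        rw [show pvBasePalette.length = 8 from rfl]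
        omega)]
    have h8 : k % pvBasePalette.length < pvBasePalette.length := Nat.mod_lt _ (by decide)
    have hmod : PySem.Int.mod ((0 : Int) + (k : Int)) ((8 : Nat) : Int)
        = ((k % 8 : Nat) : Int) := by
      rw [zero_add]; exact PySem.Int.mod_natCast k 8
    rw [List.getElem?_eq_getElem h8, Option.map_some, Function.comp_apply, hmod,
      PySem.List.pyGetD_natCast]
    rw [show pvBasePalette.length = 8 from rfl] at h8
    rw [List.getD_eq_getElem _ _ h8]
    rfl
  · rw [List.getElem?_eq_none (by simpa using by omega), if_neg hk, Option.map_none]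

-- ===== VERDICT (by name: the statement is the Claim_ definition above) =====
theorem default_palette_py_spec : Claim_equal_default_palette_py := by
  intro n _
  exact default_palette_eq n
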